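-- pv_equiv track=rewrite | github.com/Caleb-Mitchell/code_in_place | discord_extension/section5/stringconstruction.py | only_one_first_char_new
-- ===== SOURCE A (Python) =====
-- def only_one_first_char_new(s):
--     """This function builds up a new string adding all characters in the input string except those that are
--     the same as the first char
--
--     >>> only_one_first_char_new('abba abba abba')
--     'abb bb bb'
--
--     >>> only_one_first_char_new('Stanford')
--     'Stanford'
--
--     >>> only_one_first_char_new('')
--     ''
--     """
--     new_str = ''
--     if s:
--         new_str += s[0]
--     for i in s[1:]:
--         if i != s[0]:
--             new_str += i
--     return new_str
-- ===== SOURCE B (Python) =====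
-- def only_one_first_char_new(s):
--     if not s:
--         return ''
--     return s[0] + ''.join(s.split(s[0]))
-- ===== Notes on version B (the rewrite author's own statement) =====
-- stated objective: idiomatic
-- what changed: Replaces the char-by-char filtering loop (with repeated string concatenation) by a split on the first character followed by joining the pieces, prepending the first char; no explicit Python-level iteration.
import Mathlib
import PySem

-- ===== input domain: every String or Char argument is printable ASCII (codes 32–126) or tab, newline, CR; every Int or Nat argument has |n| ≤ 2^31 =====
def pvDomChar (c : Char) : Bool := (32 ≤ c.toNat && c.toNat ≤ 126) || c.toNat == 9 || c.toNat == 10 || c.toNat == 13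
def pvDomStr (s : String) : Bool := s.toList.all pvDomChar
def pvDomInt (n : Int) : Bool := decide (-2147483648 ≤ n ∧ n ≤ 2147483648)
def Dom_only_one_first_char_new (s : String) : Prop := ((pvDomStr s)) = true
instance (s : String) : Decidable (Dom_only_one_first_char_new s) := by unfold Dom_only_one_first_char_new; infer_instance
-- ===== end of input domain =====

-- B replaces A's char-by-char filtering loop by splitting the string on its first
-- character and joining the pieces, prepending the first char (more idiomatic; same value).

-- ===== PORT A =====
-- A: new_str = ''; if s: new_str += s[0]; for i in s[1:]: if i != s[0]: new_str += i
def only_one_first_char_new (s : String) : String :=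
  match s.toList with
  | [] => ""   -- 'if s' is false: new_str stays '' and the loop body never runs
  | c :: _ =>
      String.ofList
        ((PySem.Chars.slice s.toList (some 1) none).foldl
          (fun acc i => if i ≠ c then acc ++ [i] else acc) [c])

-- ===== PORT B =====
-- B: if not s: return ''; return s[0] + ''.join(s.split(s[0]))
def only_one_first_char_new_alt (s : String) : String :=
  if s.toList = [] then ""
  else
    let c := s.toList.headI
    String.ofList (c :: PySem.Chars.join [] (PySem.Chars.splitOn s.toList [c]))

-- ===== PRECONDITION & SPEC =====
def Spec_only_one_first_char_new (s : String) (out : String) : Prop := out = only_one_first_char_new_alt s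
instance (s : String) (out : String) : Decidable (Spec_only_one_first_char_new s out) := by unfold Spec_only_one_first_char_new; infer_instance

-- ===== CLAIM =====
def Claim_equal_only_one_first_char_new : Prop := ∀ (s : String), Dom_only_one_first_char_new s → Spec_only_one_first_char_new s (only_one_first_char_new s)

-- ===== LEMMAS AND PROOFS =====

-- Joining with the empty separator is plain flatten.
theorem flatten_intersperse_nil {α : Type} (xs : List (List α)) :
    (List.intersperse ([] : List α) xs).flatten = xs.flatten := by
  induction xs with
  | nil => rfl
  | cons a t ih =>
    cases t with
    | nil => rfl
    | cons b u =>
      rw [show List.intersperse ([] : List α) (a :: b :: u)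
            = a :: [] :: List.intersperse [] (b :: u) from rfl]
      simp only [List.flatten_cons, List.nil_append] at *
      simp [ih]

-- A's loop appends each tail char unequal to the first: it is a filter.
theorem foldl_if_append_filter (c : Char) (t acc : List Char) :
    t.foldl (fun acc i => if i ≠ c then acc ++ [i] else acc) acc
      = acc ++ t.filter (· ≠ c) := by
  induction t generalizing acc with
  | nil => simp
  | cons x xs ih =>
    by_cases hx : x = c
    · have hstep : (if x ≠ c then acc ++ [x] else acc) = acc := by simp [hx]
      rw [List.foldl_cons, hstep, ih]; simp [hx]
    · have hstep : (if x ≠ c then acc ++ [x] else acc) = acc ++ [x] := by simp [hx]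
      rw [List.foldl_cons, hstep, ih]; simp [hx]

-- Joining (with empty separator) the pieces of a split on [c] drops exactly the c's.
theorem join_splitOn_go_singleton (c : Char) (fuel : Nat) (l cur : List Char)
    (acc : List (List Char)) (h : l.length ≤ fuel) :
    PySem.Chars.join [] (PySem.Chars.splitOn.go [c] fuel l cur acc)
      = PySem.Chars.join [] acc.reverse ++ cur.reverse ++ l.filter (· ≠ c) := by
  induction fuel generalizing l cur acc with
  | zero =>
    have : l = [] := List.length_eq_zero_iff.mp (Nat.le_zero.mp h)
    subst this
    simp [PySem.Chars.splitOn.go, PySem.Chars.join, List.intercalate, flatten_intersperse_nil]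
  | succ n ih =>
    cases l with
    | nil =>
      simp [PySem.Chars.splitOn.go, PySem.Chars.join, List.intercalate, flatten_intersperse_nil]
    | cons x xs =>
      have hle : xs.length ≤ n := by simpa using Nat.le_of_succ_le_succ h
      by_cases hx : x = c
      · have hpre : ([c].isPrefixOf (x :: xs)) = true := by simp [List.isPrefixOf, hx]
        have hstep : PySem.Chars.splitOn.go [c] (n + 1) (x :: xs) cur acc
            = PySem.Chars.splitOn.go [c] n (List.drop 1 (x :: xs)) [] (cur.reverse :: acc) := by
          simp [PySem.Chars.splitOn.go, hpre]
        rw [hstep]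
        simp only [List.drop_succ_cons, List.drop_zero]
        rw [ih xs [] (cur.reverse :: acc) hle]
        simp [hx, PySem.Chars.join, List.intercalate, flatten_intersperse_nil]
      · have hpre : ([c].isPrefixOf (x :: xs)) = false := by
          simp only [List.isPrefixOf, Bool.and_true]
          exact beq_eq_false_iff_ne.mpr (fun hc => hx hc.symm)
        have hstep : PySem.Chars.splitOn.go [c] (n + 1) (x :: xs) cur acc
            = PySem.Chars.splitOn.go [c] n xs (x :: cur) acc := by
          simp [PySem.Chars.splitOn.go, hpre]
        rw [hstep, ih xs (x :: cur) acc hle]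
        simp [hx]

theorem join_splitOn_singleton (c : Char) (l : List Char) :
    PySem.Chars.join [] (PySem.Chars.splitOn l [c]) = l.filter (· ≠ c) := by
  unfold PySem.Chars.splitOn
  rw [join_splitOn_go_singleton c (l.length + 1) l [] [] (Nat.le_succ _)]
  simp [PySem.Chars.join, List.intercalate]

-- ===== VERDICT =====
theorem only_one_first_char_new_spec : Claim_equal_only_one_first_char_new := by
  intro s _
  unfold Spec_only_one_first_char_new only_one_first_char_new only_one_first_char_new_alt
  cases h : s.toList with
  | nil => simp [only_one_first_char_new_alt, h]
  | cons c t =>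
    simp only [List.headI, reduceCtorEq, if_false, join_splitOn_singleton,
      PySem.Chars.slice_eq_listSlice, PySem.List.slice_from_one, List.tail_cons,
      foldl_if_append_filter]
    simp
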